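-- pv_equiv track=rewrite | github.com/darennie/i2p | Week4/dtools/__init__.py | to_dol
-- ===== SOURCE A (Python) =====
-- def to_dol(lol):
--     """
--     Converts a list-of-lists (LoL) to a dict-of-lists (dol)
--     using the first element in the LoL to create column names.
--
--     :param lol: a list-of-lists where each element of the list represents a row of data
--     :returns: a dict-of-lists
--     """
--     # Create empty dict-of-lists
--     ds = {}
--
--     # I had a version of this code that used
--     # lol.pop(0) since it made the for loop
--     # easier to read. But I changed my mind...
--     #
--     # Can you think why?
--     col_names = lol[0]
--     # Write the code to create the keys and empty lists
--     for b in col_names: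
--         ds[b]=[]
--
--     # Then values into a list attached to each key
--     # and write the code to append values to each list
--     for row in lol[1:]:
--         for c in range(0,len(col_names)):
--             ds[col_names[c]].append(row[c])
--
--     return ds
-- ===== SOURCE B (Python) =====
-- def to_dol(lol):
--     col_names = lol[0]
--     n = len(col_names)
--     # Flatten all data cells into one row-major buffer, then carve each
--     # column out of it by a strided index walk.
--     flat = []
--     for row in lol[1:]:
--         flat.extend(row[:n])
--     return {name: [flat[k] for k in range(j, len(flat), n)]
--             for j, name in enumerate(col_names)}
-- ===== Notes on version B (the rewrite author's own statement) =====
-- stated objective: alternative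
-- what changed: B flattens all data cells (truncated to the header width) into one row-major buffer in a single pass, then extracts each column by a strided index walk flat[j], flat[j+n], ... and builds the dict once, instead of A's dict seeded with empty lists and filled by a row-by-row, key-by-key append loop.
-- outside the precondition, e.g. on to_dol([['a', 'a'], ['1', '2']]): A returns {'a': ['1', '2']}, B returns {'a': ['2']}; on to_dol([['a', 'b'], ['1']]): A raises IndexError, B returns {'a': ['1'], 'b': []}
import Mathlib
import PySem

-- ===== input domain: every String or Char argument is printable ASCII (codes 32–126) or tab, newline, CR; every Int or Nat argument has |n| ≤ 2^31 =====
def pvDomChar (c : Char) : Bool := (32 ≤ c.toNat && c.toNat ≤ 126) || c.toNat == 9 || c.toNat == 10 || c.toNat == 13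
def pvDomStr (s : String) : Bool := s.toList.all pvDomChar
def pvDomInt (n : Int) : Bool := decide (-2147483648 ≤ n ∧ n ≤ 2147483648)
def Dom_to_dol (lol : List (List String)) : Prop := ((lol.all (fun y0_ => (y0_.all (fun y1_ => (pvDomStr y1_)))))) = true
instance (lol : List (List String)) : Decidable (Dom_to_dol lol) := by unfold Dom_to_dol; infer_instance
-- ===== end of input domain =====

-- B flattens all data cells into one row-major buffer and then extracts each column by a
-- strided index walk, building the dict once, instead of A's per-row per-key append loops;
-- equivalence is about the RETURN value (A mutates nothing).

-- ===== PORT A =====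
-- A: ds = {}; for b in lol[0]: ds[b] = []; for row in lol[1:]: for c in range(len(names)): ds[names[c]].append(row[c])
-- lol[0] and row[c] raise IndexError where pyGet?/pyGetD would default: Pre_ excludes those inputs,
-- so the .getD ""/getD [] defaults are never reached on admitted inputs.
def to_dol (lol : List (List String)) : List (String × List String) :=
  let colNames := (PySem.List.pyGet? lol 0).getD []
  let ds : PySem.Dict String (List String) :=
    colNames.foldl (fun d b => d.insert b []) PySem.Dict.empty
  let ds2 := (PySem.List.slice lol (some 1) none).foldl
    (fun d row =>
      (PySem.List.pyRange 0 (colNames.length : Int)).foldl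
        (fun d c =>
          d.modify (PySem.List.pyGetD colNames c "") []
            (fun l => l ++ [PySem.List.pyGetD row c ""])) d) ds
  ds2.items

-- ===== PORT B =====
-- B: col_names = lol[0]; n = len(col_names); flat = []; for row in lol[1:]: flat.extend(row[:n]);
--    {name: [flat[k] for k in range(j, len(flat), n)] for j, name in enumerate(col_names)}
-- flat[k] raises IndexError where pyGetD would default, but every k produced by the range is in
-- range, so the "" default is never reached.
def to_dol_alt (lol : List (List String)) : List (String × List String) :=
  let colNames := (PySem.List.pyGet? lol 0).getD []
  let n : Int := (colNames.length : Int)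
  let flat := (PySem.List.slice lol (some 1) none).foldl
      (fun acc row => acc ++ PySem.List.slice row none (some n)) []
  ((PySem.List.enumerate colNames).foldl
    (fun (d : PySem.Dict String (List String)) p =>
      d.insert p.2 ((PySem.List.pyRange p.1 (PySem.List.len flat) n).map
        (fun k => PySem.List.pyGetD flat k ""))) PySem.Dict.empty).items

-- ===== PRECONDITION & SPEC =====
-- Pre_ excludes (a) inputs where A raises IndexError (empty lol, or a data row shorter than the
-- header) and (b) headers with duplicate column names when at least one data row is present, where
-- A's per-occurrence appends and B's dict overwrite are both accidental dict-key behaviours no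
-- caller would specify (with no data rows the two agree, so those stay inside Pre_).
def Pre_to_dol (lol : List (List String)) : Prop :=
  lol ≠ [] ∧ (lol.tail ≠ [] → (lol.headD []).Nodup) ∧
    ∀ row ∈ lol.tail, (lol.headD []).length ≤ row.length
instance (lol : List (List String)) : Decidable (Pre_to_dol lol) := by unfold Pre_to_dol; infer_instance
def pvWitness_to_dol : List (List String) := [["a", "b"], ["1", "2"], ["3", "4"]]

def Spec_to_dol (lol : List (List String)) (out : List (String × List String)) : Prop := out = to_dol_alt lol
instance (lol : List (List String)) (out : List (String × List String)) : Decidable (Spec_to_dol lol out) := by unfold Spec_to_dol; infer_instance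

-- ===== CLAIM (what is proved, stated in full; the proofs are below) =====
def Claim_equal_to_dol : Prop := ∀ (lol : List (List String)), Dom_to_dol lol → Pre_to_dol lol → Spec_to_dol lol (to_dol lol)

-- ===== LEMMAS AND PROOFS =====

-- A's inner loop over range(len(names)), restricted to the first n indices.
theorem inner_getD_range (names row : List String) (hnd : names.Nodup)
    (j : Nat) (hj : j < names.length) :
    ∀ (n : Nat), n ≤ names.length → ∀ (d : PySem.Dict String (List String)),
    ((List.range n).foldl
      (fun d c =>
        d.modify (PySem.List.pyGetD names (c : Int) "") []
          (fun l => l ++ [PySem.List.pyGetD row (c : Int) ""])) d).getD names[j] []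
    = (if j < n then d.getD names[j] [] ++ [PySem.List.pyGetD row (j : Int) ""]
       else d.getD names[j] []) := by
  intro n
  induction n with
  | zero => intro _ d; simp
  | succ n ih =>
    intro hn d
    rw [List.range_succ, List.foldl_append]
    simp only [List.foldl_cons, List.foldl_nil]
    rw [PySem.Dict.getD_modify]
    have hn' : n < names.length := hn
    rw [PySem.List.pyGetD_natCast names n ""]
    have hgd : names.getD n "" = names[n] := List.getD_eq_getElem names "" hn'
    rw [hgd]
    by_cases hje : j = n
    · subst hje
      rw [ih (Nat.le_of_lt hn') d]
      simp
    · have hne : names[j] ≠ names[n] := by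
        intro h; exact hje ((hnd.getElem_inj_iff).mp h)
      rw [if_neg hne, ih (Nat.le_of_lt hn') d]
      by_cases hlt : j < n
      · rw [if_pos hlt, if_pos (Nat.lt_succ_of_lt hlt)]
      · rw [if_neg hlt, if_neg (by omega)]

-- A's inner loop as written (pyRange, full length).
theorem inner_getD (names row : List String) (hnd : names.Nodup)
    (j : Nat) (hj : j < names.length) (d : PySem.Dict String (List String)) :
    ((PySem.List.pyRange 0 (names.length : Int)).foldl
      (fun d c =>
        d.modify (PySem.List.pyGetD names c "") []
          (fun l => l ++ [PySem.List.pyGetD row c ""])) d).getD names[j] []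
    = d.getD names[j] [] ++ [PySem.List.pyGetD row (j : Int) ""] := by
  rw [PySem.List.pyRange_zero_natCast, List.foldl_map,
    inner_getD_range names row hnd j hj names.length (le_refl _) d, if_pos hj]

-- A's outer loop: the value at the j-th column name accumulates one entry per data row.
theorem outer_getD (names : List String) (hnd : names.Nodup)
    (j : Nat) (hj : j < names.length) :
    ∀ (rows : List (List String)) (d : PySem.Dict String (List String)),
    (rows.foldl
      (fun d row =>
        (PySem.List.pyRange 0 (names.length : Int)).foldl
          (fun d c =>
            d.modify (PySem.List.pyGetD names c "") []
              (fun l => l ++ [PySem.List.pyGetD row c ""])) d) d).getD names[j] []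
    = d.getD names[j] [] ++ rows.map (fun row => PySem.List.pyGetD row (j : Int) "") := by
  intro rows
  induction rows with
  | nil => intro d; simp
  | cons r rs ih =>
    intro d
    simp only [List.foldl_cons, List.map_cons]
    rw [ih, inner_getD names r hnd j hj d, List.append_assoc]
    rfl

-- Keys are unchanged by A's inner loop when every column name is already a key.
theorem inner_keys (names row : List String)
    (d : PySem.Dict String (List String)) (hsub : ∀ x ∈ names, x ∈ d.keys) :
    ((PySem.List.pyRange 0 (names.length : Int)).foldl
      (fun d c =>
        d.modify (PySem.List.pyGetD names c "") []
          (fun l => l ++ [PySem.List.pyGetD row c ""])) d).keys = d.keys := by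
  have h := PySem.Dict.keys_foldl_modify_key
    (PySem.List.pyRange 0 (names.length : Int))
    (fun c => PySem.List.pyGetD names c "") []
    (fun _ c => fun l => l ++ [PySem.List.pyGetD row c ""]) d
  rw [h]
  have hmap : (PySem.List.pyRange 0 (names.length : Int)).map
      (fun c => PySem.List.pyGetD names c "") = names := by
    have := PySem.List.map_pyGetD_pyRange_zero names ""
    simpa [PySem.List.len] using this
  rw [hmap, PySem.Set.update_eq_append_filter]
  have hnil : (PySem.Set.ofList names).filter (fun y => !(PySem.Set.contains d.keys y)) = [] := by
    apply List.filter_eq_nil_iff.mpr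
    intro y hy
    have hyn : y ∈ names := (PySem.Set.mem_ofList names y).mp hy
    have hmem : y ∈ d.keys := hsub y hyn
    simp [PySem.Set.contains, hmem]
  rw [hnil, List.append_nil]

-- Keys are unchanged by A's outer loop.
theorem outer_keys (names : List String) :
    ∀ (rows : List (List String)) (d : PySem.Dict String (List String)),
    (∀ x ∈ names, x ∈ d.keys) →
    (rows.foldl
      (fun d row =>
        (PySem.List.pyRange 0 (names.length : Int)).foldl
          (fun d c =>
            d.modify (PySem.List.pyGetD names c "") []
              (fun l => l ++ [PySem.List.pyGetD row c ""])) d) d).keys = d.keys := by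
  intro rows
  induction rows with
  | nil => intro d _; rfl
  | cons r rs ih =>
    intro d hsub
    simp only [List.foldl_cons]
    rw [ih _ (fun x hx => by rw [inner_keys names r d hsub]; exact hsub x hx),
      inner_keys names r d hsub]

-- A's first loop: items of the seeded dict.
theorem seed_items (names : List String) (hnd : names.Nodup) :
    (names.foldl (fun (d : PySem.Dict String (List String)) b => d.insert b [])
      PySem.Dict.empty).items = names.map (fun b => (b, ([] : List String))) := by
  have h := PySem.Dict.items_foldl_insert_fresh names (fun b => b)
    (fun _ => ([] : List String)) PySem.Dict.empty
    (fun a _ => PySem.Dict.contains_empty a) (by simpa using hnd)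
  simpa using h

-- A fold over enumerate that ignores the index is a fold over the list.
theorem foldl_enumerate_snd {β : Type} (g : β → String → β) :
    ∀ (xs : List String) (s : Int) (d : β),
    (PySem.List.enumerate xs s).foldl (fun d p => g d p.2) d = xs.foldl g d := by
  intro xs
  induction xs with
  | nil => intro s d; simp [PySem.List.enumerate_nil]
  | cons x xs ih => intro s d; simp only [PySem.List.enumerate_cons, List.foldl_cons]; exact ih _ _

-- B's flatten loop is a flatMap of the truncated rows.
theorem flat_eq (n : Nat) (rows : List (List String)) :
    rows.foldl (fun acc row => acc ++ PySem.List.slice row none (some (n : Int))) []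
      = rows.flatMap (fun row => row.take n) := by
  rw [PySem.List.foldl_append_eq_flatMap]
  simp [PySem.List.slice_to_natCast]

-- Length of the flat buffer when every row covers the header.
theorem flat_len (n : Nat) :
    ∀ (rows : List (List String)), (∀ r ∈ rows, n ≤ r.length) →
    (rows.flatMap (fun row => row.take n)).length = n * rows.length := by
  intro rows
  induction rows with
  | nil => intro _; simp
  | cons r rs ih =>
    intro h
    have hr : n ≤ r.length := h r (by simp)
    simp only [List.flatMap_cons, List.length_append, List.length_take,
      min_eq_left hr, List.length_cons, ih (fun x hx => h x (by simp [hx]))]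
    ring

-- Reading past a block of known length in the flat buffer.
theorem pyGetD_append_len (xs ys : List String) (m : Nat) (d : String) :
    PySem.List.pyGetD (xs ++ ys) ((xs.length + m : Nat) : Int) d
      = PySem.List.pyGetD ys (m : Int) d := by
  rw [PySem.List.pyGetD_natCast, PySem.List.pyGetD_natCast]
  simp only [List.getD]
  rw [List.getElem?_append_right (by omega)]
  simp

-- The strided walk over the flat buffer reads exactly column j, cell by cell.
theorem stride_col_elem (n j : Nat) (hj : j < n) :
    ∀ (rows : List (List String)), (∀ r ∈ rows, n ≤ r.length) →
    ∀ (k : Nat) (hk : k < rows.length),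
    PySem.List.pyGetD (rows.flatMap (fun row => row.take n))
        ((j : Int) + (n : Int) * (k : Int)) ""
      = PySem.List.pyGetD rows[k] (j : Int) "" := by
  intro rows
  induction rows with
  | nil => intro _ k hk; exact absurd hk (by simp)
  | cons r rs ih =>
    intro h k hk
    have hr : n ≤ r.length := h r (by simp)
    have hrs : ∀ x ∈ rs, n ≤ x.length := fun x hx => h x (by simp [hx])
    match k with
    | 0 =>
      simp only [Nat.cast_zero, mul_zero, add_zero, List.flatMap_cons, List.getElem_cons_zero]
      rw [PySem.List.pyGetD_natCast, PySem.List.pyGetD_natCast]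
      have hjt : j < (r.take n).length := by simp [min_eq_left hr]; omega
      rw [List.getD_eq_getElem _ _ (by simp [List.length_append]; omega :
            j < (r.take n ++ rs.flatMap (fun row => row.take n)).length),
        List.getD_eq_getElem _ _ (by omega : j < r.length),
        List.getElem_append_left hjt]
      exact List.getElem_take
    | k + 1 =>
      simp only [List.flatMap_cons, List.getElem_cons_succ]
      have hidx : (j : Int) + (n : Int) * (((k + 1 : Nat)) : Int)
          = (((r.take n).length + (j + n * k) : Nat) : Int) := by
        simp only [List.length_take, min_eq_left hr]
        push_cast
        ring
      rw [hidx, pyGetD_append_len]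
      exact ih hrs k (by simpa using hk)

-- The pyRange of B's comprehension enumerates L strided indices.
theorem pyRange_step (n L j : Nat) (hj : j < n) :
    PySem.List.pyRange (j : Int) ((n * L : Nat) : Int) (n : Int)
      = (List.range L).map (fun k : Nat => (j : Int) + (n : Int) * (k : Int)) := by
  have hn : (0 : Int) < (n : Int) := by exact_mod_cast Nat.lt_of_le_of_lt (Nat.zero_le j) hj
  rw [PySem.List.pyRange_of_pos _ _ hn]
  have hcnt : (if (j : Int) < ((n * L : Nat) : Int)
      then ((((n * L : Nat) : Int) - j + n - 1) / n).toNat else 0) = L := by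
    split_ifs with hcond
    · have heq : ((n * L : Nat) : Int) - j + n - 1 = ((n : Int) - 1 - j) + (L : Int) * n := by
        push_cast; ring
      rw [heq, Int.add_mul_ediv_right _ _ (by omega : (n : Int) ≠ 0),
        Int.ediv_eq_zero_of_lt (by omega) (by omega)]
      simp
    · push_cast at hcond
      by_contra hL0
      have hL1 : 1 ≤ L := by omega
      have hnl : (n : Int) ≤ (n : Int) * L :=
        le_mul_of_one_le_right (by omega) (by exact_mod_cast hL1)
      omega
  rw [hcnt]

-- header only, no data rows: every strided range is empty, so B seeds the same dict as A.
theorem to_dol_eq_nil (h : List String) : to_dol [h] = to_dol_alt [h] := by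
  have hslice : PySem.List.slice [h] (some 1) none = [] := by
    rw [PySem.List.slice_from [h] (by norm_num : (0:Int) ≤ 1)]; rfl
  have hget : (PySem.List.pyGet? [h] 0).getD [] = h := by
    simp [PySem.List.pyGet?, PySem.List.pyIdx?]
  unfold to_dol to_dol_alt
  simp only [hslice, hget, List.foldl_nil]
  congr 1
  have hcg : (PySem.List.enumerate h 0).foldl
      (fun (d : PySem.Dict String (List String)) p =>
        d.insert p.2 ((PySem.List.pyRange p.1 (PySem.List.len ([] : List String)) (h.length : Int)).map
          (fun k => PySem.List.pyGetD ([] : List String) k ""))) PySem.Dict.empty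
      = (PySem.List.enumerate h 0).foldl
      (fun (d : PySem.Dict String (List String)) p => d.insert p.2 []) PySem.Dict.empty := by
    apply PySem.List.foldl_congr_mem
    intro acc p hp
    have hpos : 0 ≤ p.1 := by
      have : p.1 ∈ (PySem.List.enumerate h 0).map (·.1) := List.mem_map_of_mem hp
      rw [PySem.List.map_fst_enumerate] at this
      exact ((PySem.List.mem_pyRange_one).mp this).1
    have hlen : 0 < h.length := by
      rcases h with _ | _
      · simp [PySem.List.enumerate_nil] at hp
      · simp
    have hn : (0 : Int) < (h.length : Int) := by exact_mod_cast hlen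
    have hrange : PySem.List.pyRange p.1 (PySem.List.len ([] : List String)) (h.length : Int) = [] := by
      have h0 : PySem.List.len ([] : List String) = (0 : Int) := by simp [PySem.List.len]
      rw [h0, PySem.List.pyRange_of_pos _ _ hn, if_neg (by omega)]
      simp
    rw [hrange]
    simp
  rw [hcg]
  exact (foldl_enumerate_snd (fun d b => d.insert b []) h 0 PySem.Dict.empty).symm

theorem to_dol_eq (h : List String) (t : List (List String)) (hnd : h.Nodup)
    (hlen : ∀ row ∈ t, h.length ≤ row.length) :
    to_dol (h :: t) = to_dol_alt (h :: t) := by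
  have hslice : PySem.List.slice (h :: t) (some 1) none = t := by
    rw [PySem.List.slice_from (h :: t) (by norm_num : (0:Int) ≤ 1)]; rfl
  have hget : (PySem.List.pyGet? (h :: t) 0).getD [] = h := by
    simp [PySem.List.pyGet?, PySem.List.pyIdx?]
  unfold to_dol to_dol_alt
  simp only [hslice, hget]
  set ds0 : PySem.Dict String (List String) :=
    h.foldl (fun d b => d.insert b []) PySem.Dict.empty with hds0
  have hitems0 : ds0.items = h.map (fun b => (b, ([] : List String))) := seed_items h hnd
  have hkeys0 : ds0.keys = h := by
    show ds0.items.map (·.1) = h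
    rw [hitems0, List.map_map]; exact List.map_id h
  have hsub : ∀ x ∈ h, x ∈ ds0.keys := fun x hx => by rw [hkeys0]; exact hx
  set ds2 := t.foldl
    (fun d row =>
      (PySem.List.pyRange 0 (h.length : Int)).foldl
        (fun d c =>
          d.modify (PySem.List.pyGetD h c "") []
            (fun l => l ++ [PySem.List.pyGetD row c ""])) d) ds0 with hds2
  have hkeys2 : ds2.keys = h := by rw [hds2, outer_keys h t ds0 hsub, hkeys0]
  have hnd2 : ds2.keys.Nodup := by rw [hkeys2]; exact hnd
  -- A's result written over the key list
  have hA : ds2.items = h.map (fun k => (k, ds2.getD k [])) := by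
    have := PySem.Dict.items_eq_map_keys ds2 hnd2 ([] : List String)
    rwa [hkeys2] at this
  -- B's flat buffer
  rw [flat_eq h.length t]
  set flat := t.flatMap (fun row => List.take h.length row) with hflat
  have hflen : flat.length = h.length * t.length := flat_len h.length t hlen
  -- B's result
  have hB : ((PySem.List.enumerate h).foldl
      (fun (d : PySem.Dict String (List String)) p =>
        d.insert p.2 ((PySem.List.pyRange p.1 (PySem.List.len flat) (h.length : Int)).map
          (fun k => PySem.List.pyGetD flat k ""))) PySem.Dict.empty).items
      = (PySem.List.enumerate h).map
          (fun p => (p.2, (PySem.List.pyRange p.1 (PySem.List.len flat) (h.length : Int)).map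
            (fun k => PySem.List.pyGetD flat k ""))) := by
    have h' := PySem.Dict.items_foldl_insert_fresh (PySem.List.enumerate h)
      (fun p => p.2)
      (fun p => (PySem.List.pyRange p.1 (PySem.List.len flat) (h.length : Int)).map
        (fun k => PySem.List.pyGetD flat k ""))
      PySem.Dict.empty (fun a _ => PySem.Dict.contains_empty a.2)
      (by rw [PySem.List.map_snd_enumerate]; exact hnd)
    simpa using h'
  rw [hA, hB]
  apply List.ext_getElem
  · simp [PySem.List.length_enumerate]
  · intro j hj1 hj2
    have hjh : j < h.length := by simpa using hj1
    simp only [List.getElem_map]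
    rw [PySem.List.getElem_enumerate h 0 j (by simpa [PySem.List.length_enumerate] using hjh)]
    have hlenI : PySem.List.len flat = ((h.length * t.length : Nat) : Int) := by
      simp [PySem.List.len, hflen]
    have hvalB : (PySem.List.pyRange ((0 : Int) + j) (PySem.List.len flat) (h.length : Int)).map
        (fun k => PySem.List.pyGetD flat k "")
        = t.map (fun row => PySem.List.pyGetD row (j : Int) "") := by
      rw [hlenI]
      have h0j : ((0 : Int) + j) = ((j : Nat) : Int) := by simp
      rw [h0j, pyRange_step h.length t.length j hjh, List.map_map]
      apply List.ext_getElem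
      · simp
      · intro k hk1 hk2
        simp only [List.getElem_map, List.getElem_range, Function.comp]
        exact stride_col_elem h.length j hjh t hlen k (by simpa using hk2)
    have hvalA : ds2.getD h[j] [] = t.map (fun row => PySem.List.pyGetD row (j : Int) "") := by
      rw [hds2, outer_getD h hnd j hjh t ds0]
      have : ds0.getD h[j] [] = [] := by
        refine PySem.Dict.getD_of_mem_items ds0 ?_ (by rw [hkeys0]; exact hnd) []
        rw [hitems0]
        exact List.mem_map.mpr ⟨h[j], List.getElem_mem hjh, rfl⟩
      rw [this, List.nil_append]
    rw [hvalA, hvalB]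

-- ===== VERDICT (by name: the statement is the Claim_ definition above) =====
theorem to_dol_spec : Claim_equal_to_dol := by
  intro lol _ hpre
  obtain ⟨hne, hnd, hlen⟩ := hpre
  match lol with
  | [] => exact absurd rfl hne
  | h :: [] =>
    show to_dol [h] = to_dol_alt [h]
    exact to_dol_eq_nil h
  | h :: r :: t =>
    show to_dol (h :: r :: t) = to_dol_alt (h :: r :: t)
    exact to_dol_eq h (r :: t) (hnd (by simp)) (by simpa using hlen)
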